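-- pv_equiv track=rewrite | github.com/richardkoehler/pte | pte/filetools/bids.py | _get_mapping_dict
-- ===== SOURCE A (Python) =====
-- from typing import List
--
-- def _get_mapping_dict(ch_names: List[str]) -> dict:
--     """Create dictionary for remapping channel types.
--
--     Arguments
--     ---------
--     ch_names : list
--         List of channel names to be remapped.
--
--     Returns
--     -------
--     remapping_dict : dict
--         Dictionary mapping each channel name to a channel type.
--     """
--     remapping_dict = {}
--     for ch_name in ch_names:
--         if ch_name.startswith("ECOG"):
--             remapping_dict[ch_name] = "ecog"
--         elif ch_name.startswith(("LFP", "STN")):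
--             remapping_dict[ch_name] = "dbs"
--         elif ch_name.startswith("EMG"):
--             remapping_dict[ch_name] = "emg"
--         elif ch_name.startswith("EEG"):
--             remapping_dict[ch_name] = "eeg"
--         elif ch_name.startswith(
--             ("MOV", "ANALOG", "ROT", "ACC", "AUX", "X", "Y", "Z", "MISC")
--         ):
--             remapping_dict[ch_name] = "misc"
--         else:
--             remapping_dict[ch_name] = "misc"
--     return remapping_dict
-- ===== SOURCE B (Python) =====
-- from typing import List
--
-- _PASSES = [("EEG", "eeg"), ("EMG", "emg"), ("STN", "dbs"), ("LFP", "dbs"), ("ECOG", "ecog")]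
--
-- def _get_mapping_dict(ch_names: List[str]) -> dict:
--     """Create dictionary for remapping channel types (staged-overwrite version).
--
--     Start with every channel mapped to "misc", then run one overwrite pass per
--     prefix in increasing priority order, so a higher-priority match overwrites
--     a lower-priority one.
--     """
--     remapping_dict = dict.fromkeys(ch_names, "misc")
--     for prefix, ch_type in _PASSES:
--         for ch_name in ch_names:
--             if ch_name.startswith(prefix):
--                 remapping_dict[ch_name] = ch_type
--     return remapping_dict
-- ===== Notes on version B (the rewrite author's own statement) =====
-- stated objective: alternative
-- what changed: Replaces A's single pass with a per-name if/elif prefix cascade by a staged-overwrite scheme: initialise every channel to 'misc' with dict.fromkeys, then run one overwrite pass over the names per prefix rule in increasing priority order, so the highest-priority match is written last.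
import Mathlib
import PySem

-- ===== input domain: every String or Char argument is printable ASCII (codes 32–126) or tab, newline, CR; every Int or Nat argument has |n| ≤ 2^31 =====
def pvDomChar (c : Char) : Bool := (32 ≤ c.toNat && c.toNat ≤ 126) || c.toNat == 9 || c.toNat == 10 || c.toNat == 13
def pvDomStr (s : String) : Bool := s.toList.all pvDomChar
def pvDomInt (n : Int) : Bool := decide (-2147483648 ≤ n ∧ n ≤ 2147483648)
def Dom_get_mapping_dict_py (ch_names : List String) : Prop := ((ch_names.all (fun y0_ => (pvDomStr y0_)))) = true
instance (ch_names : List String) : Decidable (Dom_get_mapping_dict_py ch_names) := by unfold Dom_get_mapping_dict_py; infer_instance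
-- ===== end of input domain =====

-- B replaces A's per-name if/elif cascade by staged overwrite passes: every name starts as "misc",
-- then one pass per prefix (in increasing priority) overwrites matching names (alternative; same cost).

-- ===== PORT A =====
def get_mapping_dict_py (ch_names : List String) : List (String × String) :=
  (ch_names.foldl (fun remapping_dict ch_name =>
    if PySem.Str.startswith ch_name "ECOG" then remapping_dict.insert ch_name "ecog"
    else if PySem.Str.startswith ch_name "LFP" || PySem.Str.startswith ch_name "STN" then
      remapping_dict.insert ch_name "dbs"
    else if PySem.Str.startswith ch_name "EMG" then remapping_dict.insert ch_name "emg"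
    else if PySem.Str.startswith ch_name "EEG" then remapping_dict.insert ch_name "eeg"
    else if ["MOV", "ANALOG", "ROT", "ACC", "AUX", "X", "Y", "Z", "MISC"].any
        (fun p => PySem.Str.startswith ch_name p) then
      remapping_dict.insert ch_name "misc"
    else remapping_dict.insert ch_name "misc")
    (PySem.Dict.empty : PySem.Dict String String)).items

-- ===== PORT B =====
def pvPasses : List (String × String) :=
  [("EEG", "eeg"), ("EMG", "emg"), ("STN", "dbs"), ("LFP", "dbs"), ("ECOG", "ecog")]

def get_mapping_dict_py_alt (ch_names : List String) : List (String × String) :=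
  let d0 := ch_names.foldl (fun d n => d.insert n "misc")
    (PySem.Dict.empty : PySem.Dict String String)
  (pvPasses.foldl (fun d pr =>
      ch_names.foldl (fun d n =>
        if PySem.Str.startswith n pr.1 then d.insert n pr.2 else d) d)
    d0).items

-- ===== PRECONDITION & SPEC =====
def Spec_get_mapping_dict_py (ch_names : List String) (out : List (String × String)) : Prop := out = get_mapping_dict_py_alt ch_names
instance (ch_names : List String) (out : List (String × String)) : Decidable (Spec_get_mapping_dict_py ch_names out) := by unfold Spec_get_mapping_dict_py; infer_instance

-- ===== CLAIM (what is proved, stated in full; the proofs are below) =====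
def Claim_equal_get_mapping_dict_py : Prop := ∀ (ch_names : List String), Dom_get_mapping_dict_py ch_names → Spec_get_mapping_dict_py ch_names (get_mapping_dict_py ch_names)

-- ===== LEMMAS AND PROOFS =====

-- the value A's cascade assigns to one name
def pvTypeA (n : String) : String :=
  if PySem.Str.startswith n "ECOG" then "ecog"
  else if PySem.Str.startswith n "LFP" || PySem.Str.startswith n "STN" then "dbs"
  else if PySem.Str.startswith n "EMG" then "emg"
  else if PySem.Str.startswith n "EEG" then "eeg"
  else "misc"

lemma pvStepA_eq (d : PySem.Dict String String) (n : String) :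
    (if PySem.Str.startswith n "ECOG" then d.insert n "ecog"
     else if PySem.Str.startswith n "LFP" || PySem.Str.startswith n "STN" then
       d.insert n "dbs"
     else if PySem.Str.startswith n "EMG" then d.insert n "emg"
     else if PySem.Str.startswith n "EEG" then d.insert n "eeg"
     else if ["MOV", "ANALOG", "ROT", "ACC", "AUX", "X", "Y", "Z", "MISC"].any
         (fun p => PySem.Str.startswith n p) then
       d.insert n "misc"
     else d.insert n "misc") = d.insert n (pvTypeA n) := by
  unfold pvTypeA
  split_ifs <;> simp_all

-- getD through a fold of unconditional inserts with a value depending only on the key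
lemma pv_getD_foldl_insert (l : List String) (f : String → String)
    (d : PySem.Dict String String) (k dflt : String) :
    (l.foldl (fun d n => d.insert n (f n)) d).getD k dflt
      = if k ∈ l then f k else d.getD k dflt := by
  induction l generalizing d with
  | nil => simp
  | cons n l ih =>
    simp only [List.foldl_cons, ih, PySem.Dict.getD_insert, List.mem_cons]
    by_cases hkl : k ∈ l <;> by_cases hkn : k = n <;> simp [hkl, hkn]

-- contains through a fold of unconditional inserts
lemma pv_contains_foldl_insert (l : List String) (f : String → String)
    (d : PySem.Dict String String) (k : String) (hk : k ∈ l) :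
    (l.foldl (fun d n => d.insert n (f n)) d).contains k = true := by
  rw [PySem.Dict.contains_iff_mem_keys,
    PySem.Dict.keys_foldl_insert l (fun _ n => f n) d]
  exact (PySem.Set.mem_update _ _ _).mpr (Or.inr hk)

-- one overwrite pass: keys unchanged (all touched names are already keys)
lemma pv_keys_pass (l : List String) (P : String → Bool) (t : String)
    (d : PySem.Dict String String) (h : ∀ n ∈ l, d.contains n = true) :
    (l.foldl (fun d n => if P n then d.insert n t else d) d).keys = d.keys := by
  induction l generalizing d with
  | nil => rfl
  | cons n l ih =>
    simp only [List.foldl_cons]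
    by_cases hp : P n
    · rw [if_pos hp, ih]
      · exact PySem.Dict.keys_insert_of_contains d t (h n (by simp))
      · intro m hm
        rw [PySem.Dict.contains_insert]
        simp [h m (by simp [hm])]
    · rw [if_neg hp]
      exact ih _ (fun m hm => h m (by simp [hm]))

-- one overwrite pass: the value read afterwards
lemma pv_getD_pass (l : List String) (P : String → Bool) (t : String)
    (d : PySem.Dict String String) (k dflt : String) :
    (l.foldl (fun d n => if P n then d.insert n t else d) d).getD k dflt
      = if k ∈ l ∧ P k = true then t else d.getD k dflt := by
  induction l generalizing d with
  | nil => simp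
  | cons n l ih =>
    simp only [List.foldl_cons, ih, List.mem_cons]
    by_cases hkl : k ∈ l ∧ P k = true
    · simp [hkl]
    · by_cases hkn : k = n
      · subst hkn
        by_cases hp : P k <;> simp [hp]
      · by_cases hp : P n <;> simp [hp, hkn, hkl, PySem.Dict.getD_insert]

-- contains is preserved by an overwrite pass
lemma pv_contains_pass (l : List String) (P : String → Bool) (t : String)
    (d : PySem.Dict String String) (h : ∀ n ∈ l, d.contains n = true) (k : String)
    (hk : d.contains k = true) :
    (l.foldl (fun d n => if P n then d.insert n t else d) d).contains k = true := by
  rw [PySem.Dict.contains_iff_mem_keys, pv_keys_pass l P t d h,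
    ← PySem.Dict.contains_iff_mem_keys]
  exact hk

-- the whole sequence of passes: keys unchanged
lemma pv_keys_passes (ps : List (String × String)) (l : List String)
    (d : PySem.Dict String String) (h : ∀ n ∈ l, d.contains n = true) :
    (ps.foldl (fun d pr =>
        l.foldl (fun d n =>
          if PySem.Str.startswith n pr.1 then d.insert n pr.2 else d) d) d).keys
      = d.keys := by
  induction ps generalizing d with
  | nil => rfl
  | cons p ps ih =>
    simp only [List.foldl_cons]
    rw [ih _ (fun n hn => pv_contains_pass l _ _ d h n (h n hn)),
      pv_keys_pass l _ _ d h]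

-- the whole sequence of passes: the value read afterwards (last matching pass wins)
lemma pv_getD_passes (ps : List (String × String)) (l : List String)
    (d : PySem.Dict String String) (k dflt : String) :
    (ps.foldl (fun d pr =>
        l.foldl (fun d n =>
          if PySem.Str.startswith n pr.1 then d.insert n pr.2 else d) d) d).getD k dflt
      = ps.foldl (fun acc pr =>
          if k ∈ l ∧ PySem.Str.startswith k pr.1 = true then pr.2 else acc)
          (d.getD k dflt) := by
  induction ps generalizing d with
  | nil => rfl
  | cons p ps ih =>
    simp only [List.foldl_cons, ih, pv_getD_pass]

-- ===== VERDICT (by name: the statement is the Claim_ definition above) =====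
theorem get_mapping_dict_py_spec : Claim_equal_get_mapping_dict_py := by
  intro ch_names _
  unfold Spec_get_mapping_dict_py get_mapping_dict_py get_mapping_dict_py_alt
  simp only [pvStepA_eq]
  set d0 : PySem.Dict String String :=
    ch_names.foldl (fun d n => d.insert n "misc") PySem.Dict.empty with hd0
  have hc0 : ∀ n ∈ ch_names, d0.contains n = true := fun n hn =>
    pv_contains_foldl_insert ch_names _ _ n hn
  have hkeysA : (ch_names.foldl (fun d n => d.insert n (pvTypeA n))
      (PySem.Dict.empty : PySem.Dict String String)).keys
      = PySem.Set.update PySem.Dict.empty.keys ch_names :=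
    PySem.Dict.keys_foldl_insert ch_names (fun _ n => pvTypeA n) _
  have hkeys0 : d0.keys = PySem.Set.update PySem.Dict.empty.keys ch_names :=
    PySem.Dict.keys_foldl_insert ch_names (fun _ _ => "misc") _
  have hndA : (ch_names.foldl (fun d n => d.insert n (pvTypeA n))
      (PySem.Dict.empty : PySem.Dict String String)).keys.Nodup :=
    PySem.Dict.nodup_keys_foldl_insert ch_names (fun _ n => pvTypeA n) _
      (by simp [PySem.Dict.keys_empty])
  have hnd0 : d0.keys.Nodup :=
    PySem.Dict.nodup_keys_foldl_insert ch_names (fun _ _ => "misc") _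
      (by simp [PySem.Dict.keys_empty])
  have hkeysB := pv_keys_passes pvPasses ch_names d0 hc0
  rw [PySem.Dict.items_eq_map_keys _ hndA "",
    PySem.Dict.items_eq_map_keys _ (hkeysB ▸ hnd0) "",
    hkeysB, hkeysA, hkeys0]
  apply List.map_congr_left
  intro k hkmem
  have hk : k ∈ ch_names := by
    rcases (PySem.Set.mem_update _ _ _).mp hkmem with h | h
    · simp [PySem.Dict.keys_empty] at h
    · exact h
  have hA : (ch_names.foldl (fun d n => d.insert n (pvTypeA n))
      (PySem.Dict.empty : PySem.Dict String String)).getD k "" = pvTypeA k := by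
    rw [pv_getD_foldl_insert, if_pos hk]
  have h0 : d0.getD k "" = "misc" := by
    rw [hd0, pv_getD_foldl_insert, if_pos hk]
  rw [hA, pv_getD_passes, h0]
  simp only [pvPasses, List.foldl_cons, List.foldl_nil]
  unfold pvTypeA
  by_cases h1 : PySem.Chars.startswith k.toList ['E', 'C', 'O', 'G'] <;>
    by_cases h2 : PySem.Chars.startswith k.toList ['L', 'F', 'P'] <;>
      by_cases h3 : PySem.Chars.startswith k.toList ['S', 'T', 'N'] <;>
        by_cases h4 : PySem.Chars.startswith k.toList ['E', 'M', 'G'] <;>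
          by_cases h5 : PySem.Chars.startswith k.toList ['E', 'E', 'G'] <;>
            simp [h1, h2, h3, h4, h5, hk]
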